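-- pv_equiv track=rewrite | github.com/ABDULLAHUMAR020703/Generic-Automation-Playwright | recorder.py | _collapse_fills
-- ===== SOURCE A (Python) =====
-- def _collapse_fills(steps):
--     """Collapse multiple fill actions on the same selector into the last one"""
--     collapsed = []
--     last_fills = {}
--
--     for step in steps:
--         if step["action"] == "fill":
--             last_fills[step["selector"]] = step
--         else:
--             collapsed.extend(last_fills.values())
--             last_fills = {}
--             collapsed.append(step)
--
--     collapsed.extend(last_fills.values())
--     return collapsed
-- ===== SOURCE B (Python) =====
-- def _collapse_fills(steps):
--     """Collapse multiple fill actions on the same selector into the last one.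
--
--     Table-driven staged passes instead of a stateful flush loop:
--     (1) label every step with the id of the maximal fill-run it lies in,
--     (2) tabulate, per (run id, selector), the index of the first fill and the
--         step of the last fill,
--     (3) emit: non-fills pass through; a fill is emitted only at the first
--         index of its (run id, selector), carrying the last such step."""
--     gids = []
--     g = 0
--     for step in steps:
--         gids.append(g)
--         if step["action"] != "fill":
--             g += 1
--
--     first = {}
--     last = {}
--     for i, step in enumerate(steps):
--         if step["action"] == "fill":
--             key = (gids[i], step["selector"])
--             first.setdefault(key, i)
--             last[key] = step
--
--     out = []
--     for i, step in enumerate(steps):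
--         if step["action"] != "fill":
--             out.append(step)
--         elif first[(gids[i], step["selector"])] == i:
--             out.append(last[(gids[i], step["selector"])])
--     return out
-- ===== Notes on version B (the rewrite author's own statement) =====
-- stated objective: alternative
-- what changed: Replaces A's stateful flush loop (output list plus a pending last-fills dict emptied at every non-fill step) by three staged whole-list passes: label each step with its fill-run id, tabulate first index and last step per (run id, selector), then emit each fill only at its first index carrying the tabulated last step.
import Mathlib
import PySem

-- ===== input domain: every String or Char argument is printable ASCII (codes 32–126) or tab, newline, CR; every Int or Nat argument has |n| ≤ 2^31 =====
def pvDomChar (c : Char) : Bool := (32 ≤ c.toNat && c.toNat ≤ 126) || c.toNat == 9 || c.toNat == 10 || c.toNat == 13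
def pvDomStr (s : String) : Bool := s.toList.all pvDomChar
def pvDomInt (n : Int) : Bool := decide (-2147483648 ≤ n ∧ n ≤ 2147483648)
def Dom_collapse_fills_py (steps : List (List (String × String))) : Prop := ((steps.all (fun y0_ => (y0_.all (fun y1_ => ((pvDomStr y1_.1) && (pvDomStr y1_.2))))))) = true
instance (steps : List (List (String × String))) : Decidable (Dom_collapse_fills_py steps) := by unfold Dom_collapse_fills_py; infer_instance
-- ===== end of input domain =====

-- B replaces A's stateful flush loop (output list + pending last-fills dict emptied at each
-- non-fill) by three staged whole-list passes: label every step with its fill-run id, tabulate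
-- first index and last step per (run id, selector), then emit each fill only at its first index,
-- carrying the last step; objective: alternative decomposition, same cost.
-- Proved equal on Pre_ (every step has an "action" key, and a "selector" key when it is a fill;
-- elsewhere Python A raises KeyError).

-- step[k] for a step dict; the KeyError case (missing key) is excluded by Pre_ below
def pvGetS (step : List (String × String)) (k : String) : String :=
  (PySem.Dict.mk step).getD k ""

def pvIsFill (step : List (String × String)) : Bool := pvGetS step "action" == "fill"

def pvSel (step : List (String × String)) : String := pvGetS step "selector"

-- ===== PORT A =====
-- loop body of A: state = (collapsed, last_fills)
def pvAStep (st : List (List (String × String)) × PySem.Dict String (List (String × String)))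
    (step : List (String × String)) :
    List (List (String × String)) × PySem.Dict String (List (String × String)) :=
  if pvGetS step "action" == "fill" then
    (st.1, st.2.insert (pvGetS step "selector") step)
  else
    (st.1 ++ st.2.values ++ [step], PySem.Dict.empty)

def collapse_fills_py (steps : List (List (String × String))) : List (List (String × String)) :=
  let st := steps.foldl pvAStep ([], PySem.Dict.empty)
  st.1 ++ st.2.values

-- ===== PORT B =====
-- pass 1 body: state = (gids, g); append the current run id, bump it after a non-fill
def pvB1 (st : List Int × Int) (step : List (String × String)) : List Int × Int :=
  (st.1 ++ [st.2], if !(pvGetS step "action" == "fill") then st.2 + 1 else st.2)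

-- (run id, selector) of an enumerated (index, (gid, step)) triple
def pvKey (q : Int × (Int × List (String × String))) : Int × String := (q.2.1, pvSel q.2.2)

-- pass 2 body: state = (first, last) tables keyed by (run id, selector)
def pvB2
    (fl : PySem.Dict (Int × String) Int × PySem.Dict (Int × String) (List (String × String)))
    (q : Int × (Int × List (String × String))) :
    PySem.Dict (Int × String) Int × PySem.Dict (Int × String) (List (String × String)) :=
  if pvIsFill q.2.2 then (fl.1.setdefault (pvKey q) q.1, fl.2.insert (pvKey q) q.2.2) else fl

-- pass 3 body: Python's first[key] / last[key]; for a fill the key is always present in both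
-- tables (pass 2 put it there), so the total getD form is exact — the defaults are never read
def pvB3 (F : PySem.Dict (Int × String) Int)
    (L : PySem.Dict (Int × String) (List (String × String)))
    (out : List (List (String × String))) (q : Int × (Int × List (String × String))) :
    List (List (String × String)) :=
  if !(pvIsFill q.2.2) then out ++ [q.2.2]
  else if F.getD (pvKey q) (-1) == q.1 then out ++ [L.getD (pvKey q) []] else out

def collapse_fills_py_alt (steps : List (List (String × String))) : List (List (String × String)) :=
  let gids := (steps.foldl pvB1 ([], 0)).1
  let pz := PySem.List.enumerate (gids.zip steps) 0
  let fl := pz.foldl pvB2 (PySem.Dict.empty, PySem.Dict.empty)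
  pz.foldl (pvB3 fl.1 fl.2) []

-- ===== PRECONDITION & SPEC =====
-- Pre_ excludes exactly the inputs on which Python A raises KeyError: a step without an
-- "action" key, or a fill step without a "selector" key.
def Pre_collapse_fills_py (steps : List (List (String × String))) : Prop :=
  ∀ step ∈ steps,
    ((PySem.Dict.mk step).get? "action").isSome ∧
    ((PySem.Dict.mk step).get? "action" = some "fill" →
      ((PySem.Dict.mk step).get? "selector").isSome)
instance (steps : List (List (String × String))) : Decidable (Pre_collapse_fills_py steps) := by
  unfold Pre_collapse_fills_py; infer_instance

def pvWitness_collapse_fills_py : (List (List (String × String))) :=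
  [[("action", "fill"), ("selector", "#a"), ("value", "x")],
   [("action", "fill"), ("selector", "#a"), ("value", "y")],
   [("action", "click"), ("selector", "#b")]]

def Spec_collapse_fills_py (steps : List (List (String × String))) (out : List (List (String × String))) : Prop := out = collapse_fills_py_alt steps
instance (steps : List (List (String × String))) (out : List (List (String × String))) : Decidable (Spec_collapse_fills_py steps out) := by unfold Spec_collapse_fills_py; infer_instance

-- ===== CLAIM (what is proved, stated in full; the proofs are below) =====
def Claim_equal_collapse_fills_py : Prop := ∀ (steps : List (List (String × String))), Dom_collapse_fills_py steps → Pre_collapse_fills_py steps → Spec_collapse_fills_py steps (collapse_fills_py steps)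

-- ===== LEMMAS AND PROOFS =====

-- A's tail computation starting from pending dict d (collapsed prefix factored out)
def pvR (d : PySem.Dict String (List (String × String))) :
    List (List (String × String)) → List (List (String × String))
  | [] => d.values
  | s :: rest =>
    if pvIsFill s then pvR (d.insert (pvSel s) s) rest
    else d.values ++ s :: pvR PySem.Dict.empty rest

-- run-id stream of B's pass 1, as a structural recursion
def pvGids : List (List (String × String)) → Int → List Int
  | [], _ => []
  | s :: rest, g => g :: pvGids rest (if pvIsFill s then g else g + 1)

-- the (index, (gid, step)) stream B's passes 2 and 3 run over
def pvPZ (steps : List (List (String × String))) (i0 g : Int) :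
    List (Int × (Int × List (String × String))) :=
  PySem.List.enumerate ((pvGids steps g).zip steps) i0

-- one emitted chunk of B's pass 3
def pvEmit (F : PySem.Dict (Int × String) Int)
    (L : PySem.Dict (Int × String) (List (String × String)))
    (q : Int × (Int × List (String × String))) : List (List (String × String)) :=
  if !(pvIsFill q.2.2) then [q.2.2]
  else if F.getD (pvKey q) (-1) == q.1 then [L.getD (pvKey q) []] else []

theorem pvFoldA (steps : List (List (String × String)))
    (acc : List (List (String × String))) (d : PySem.Dict String (List (String × String))) :
    (steps.foldl pvAStep (acc, d)).1 ++ (steps.foldl pvAStep (acc, d)).2.values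
      = acc ++ pvR d steps := by
  induction steps generalizing acc d with
  | nil => simp [pvR]
  | cons s rest ih =>
    simp only [List.foldl_cons, pvAStep, pvR, pvIsFill, pvSel]
    by_cases h : (pvGetS s "action" == "fill") = true
    · simp only [h, if_pos]
      exact ih acc _
    · simp only [h, if_neg, Bool.false_eq_true, not_false_iff]
      rw [ih]
      simp

theorem pvGidsFold (steps : List (List (String × String))) (acc : List Int) (g : Int) :
    (steps.foldl pvB1 (acc, g)).1 = acc ++ pvGids steps g := by
  induction steps generalizing acc g with
  | nil => simp [pvGids]
  | cons s rest ih =>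
    simp only [List.foldl_cons, pvB1, pvGids, pvIsFill]
    by_cases h : (pvGetS s "action" == "fill") = true
    · simp only [h, Bool.not_true, Bool.false_eq_true, if_neg, not_false_iff, if_pos]
      rw [ih]; simp
    · simp only [Bool.not_eq_true] at h
      simp only [h, Bool.not_false, if_pos, Bool.false_eq_true, if_neg, not_false_iff]
      rw [ih]; simp

theorem pvP3Flat (pz : List (Int × (Int × List (String × String))))
    (F : PySem.Dict (Int × String) Int)
    (L : PySem.Dict (Int × String) (List (String × String)))
    (out : List (List (String × String))) :
    pz.foldl (pvB3 F L) out = out ++ pz.flatMap (pvEmit F L) := by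
  have hb : pvB3 F L = fun out q => out ++ pvEmit F L q := by
    funext out q
    unfold pvB3 pvEmit
    split
    · rfl
    · split <;> simp
  rw [hb, PySem.List.foldl_append_eq_flatMap]

-- every run id in pvGids steps g is at least g
theorem pvGidsGE (steps : List (List (String × String))) (g x : Int)
    (h : x ∈ pvGids steps g) : g ≤ x := by
  induction steps generalizing g with
  | nil => simp [pvGids] at h
  | cons s rest ih =>
    simp only [pvGids, List.mem_cons] at h
    rcases h with h | h
    · omega
    · have := ih _ h
      split at this <;> omega

-- pass 2 never touches a key no fill of the stream carries (last table)
theorem pvP2SkipL (pz : List (Int × (Int × List (String × String))))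
    (fl : PySem.Dict (Int × String) Int × PySem.Dict (Int × String) (List (String × String)))
    (k : Int × String) (h : ∀ q ∈ pz, pvIsFill q.2.2 = true → pvKey q ≠ k) :
    (pz.foldl pvB2 fl).2.get? k = fl.2.get? k := by
  induction pz generalizing fl with
  | nil => rfl
  | cons q pz ih =>
    simp only [List.foldl_cons, pvB2]
    by_cases hq : pvIsFill q.2.2 = true
    · simp only [hq, if_pos]
      rw [ih _ (fun q hqm => h q (List.mem_cons_of_mem _ hqm))]
      exact PySem.Dict.get?_insert_of_ne _ _ (h q (List.mem_cons_self) hq).symm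
    · simp only [hq, if_neg, Bool.false_eq_true, not_false_iff]
      exact ih _ (fun q hqm => h q (List.mem_cons_of_mem _ hqm))

-- setdefault never overwrites: a first-table entry survives pass 2
theorem pvP2KeepF (pz : List (Int × (Int × List (String × String))))
    (fl : PySem.Dict (Int × String) Int × PySem.Dict (Int × String) (List (String × String)))
    (k : Int × String) (v : Int) (h : fl.1.get? k = some v) :
    (pz.foldl pvB2 fl).1.get? k = some v := by
  induction pz generalizing fl with
  | nil => exact h
  | cons q pz ih =>
    simp only [List.foldl_cons, pvB2]
    by_cases hq : pvIsFill q.2.2 = true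
    · simp only [hq, if_pos]
      apply ih
      by_cases hk : k = pvKey q
      · subst hk
        rw [PySem.Dict.get?_setdefault_self, h]
        rfl
      · rw [PySem.Dict.get?_setdefault_of_ne _ _ hk, h]
    · simp only [hq, if_neg, Bool.false_eq_true, not_false_iff]
      exact ih _ h

-- every gid occurring in the stream pvPZ steps i0 g is at least g
theorem pvPZGid (steps : List (List (String × String))) (i0 g : Int)
    (q : Int × (Int × List (String × String))) (hq : q ∈ pvPZ steps i0 g) : g ≤ q.2.1 := by
  have h2 : q.2 ∈ (pvGids steps g).zip steps := by
    have := List.mem_map_of_mem (f := (·.2)) hq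
    rwa [pvPZ, PySem.List.map_snd_enumerate] at this
  exact pvGidsGE _ _ _ (List.of_mem_zip h2).1

-- MAIN: A's pending-dict runner = flush of the pending keys (at their final table values)
-- followed by B's table-driven emission over the remaining stream
theorem pvMain (steps : List (List (String × String))) (i0 g : Int)
    (F0 : PySem.Dict (Int × String) Int)
    (L0 : PySem.Dict (Int × String) (List (String × String)))
    (d : PySem.Dict String (List (String × String)))
    (hnd : d.keys.Nodup)
    (hF : ∀ k : Int × String, g ≤ k.1 →
      ((k.1 = g ∧ k.2 ∈ d.keys) → ∃ j, F0.get? k = some j ∧ j < i0) ∧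
      (¬(k.1 = g ∧ k.2 ∈ d.keys) → F0.get? k = none))
    (hL : ∀ k : Int × String, g ≤ k.1 →
      (k.1 = g → L0.get? k = d.get? k.2) ∧ (g < k.1 → L0.get? k = none)) :
    pvR d steps =
      d.keys.map (fun k => ((pvPZ steps i0 g).foldl pvB2 (F0, L0)).2.getD (g, k) []) ++
      (pvPZ steps i0 g).flatMap
        (pvEmit ((pvPZ steps i0 g).foldl pvB2 (F0, L0)).1
                ((pvPZ steps i0 g).foldl pvB2 (F0, L0)).2) := by
  induction steps generalizing i0 g F0 L0 d with
  | nil =>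
    simp only [pvPZ, pvGids, List.zip_nil_right, PySem.List.enumerate_nil, List.foldl_nil,
      List.flatMap_nil, List.append_nil, pvR]
    rw [PySem.Dict.values_eq_map_keys d hnd []]
    apply List.map_congr_left
    intro k hk
    rw [PySem.Dict.getD_eq_get?_getD, PySem.Dict.getD_eq_get?_getD,
      ((hL (g, k) le_rfl).1 rfl)]
  | cons s rest ih =>
    by_cases hs : pvIsFill s = true
    · -- a fill step: it moves into the pending dict on A's side, and on B's side
      -- seeds/extends the first and last tables for key (g, sel s)
      have hpz : pvPZ (s :: rest) i0 g = (i0, (g, s)) :: pvPZ rest (i0 + 1) g := by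
        simp [pvPZ, pvGids, hs, List.zip_cons_cons, PySem.List.enumerate_cons]
      have hkey : pvKey (i0, (g, s)) = (g, pvSel s) := rfl
      have hstep : pvB2 (F0, L0) (i0, (g, s))
          = (F0.setdefault (g, pvSel s) i0, L0.insert (g, pvSel s) s) := by
        simp [pvB2, hs, hkey]
      have hfold : (pvPZ (s :: rest) i0 g).foldl pvB2 (F0, L0)
          = (pvPZ rest (i0 + 1) g).foldl pvB2
              (F0.setdefault (g, pvSel s) i0, L0.insert (g, pvSel s) s) := by
        rw [hpz, List.foldl_cons, hstep]
      have hF1self : (F0.setdefault (g, pvSel s) i0).get? (g, pvSel s)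
          = some ((F0.get? (g, pvSel s)).getD i0) :=
        PySem.Dict.get?_setdefault_self _ _ _
      -- the invariants transported to the extended pending dict and tables
      have hnd' : (d.insert (pvSel s) s).keys.Nodup := PySem.Dict.nodup_keys_insert _ _ _ hnd
      have hF' : ∀ k : Int × String, g ≤ k.1 →
          ((k.1 = g ∧ k.2 ∈ (d.insert (pvSel s) s).keys) →
            ∃ j, (F0.setdefault (g, pvSel s) i0).get? k = some j ∧ j < i0 + 1) ∧
          (¬(k.1 = g ∧ k.2 ∈ (d.insert (pvSel s) s).keys) →
            (F0.setdefault (g, pvSel s) i0).get? k = none) := by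
        intro k hgk
        by_cases hk : k = (g, pvSel s)
        · subst hk
          constructor
          · intro _
            by_cases hmem : pvSel s ∈ d.keys
            · obtain ⟨j, hj, hjlt⟩ := (hF (g, pvSel s) le_rfl).1 ⟨rfl, hmem⟩
              exact ⟨j, by rw [hF1self, hj]; rfl, by omega⟩
            · have h0 : F0.get? (g, pvSel s) = none :=
                (hF (g, pvSel s) le_rfl).2 (by simp [hmem])
              exact ⟨i0, by rw [hF1self, h0]; rfl, by omega⟩
          · intro hn
            exact absurd ⟨rfl, by rw [PySem.Dict.mem_keys_insert]; left; rfl⟩ hn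
        · have hset : (F0.setdefault (g, pvSel s) i0).get? k = F0.get? k :=
            PySem.Dict.get?_setdefault_of_ne _ _ hk
          constructor
          · rintro ⟨hkg, hmem'⟩
            rw [PySem.Dict.mem_keys_insert] at hmem'
            rcases hmem' with hmem' | hmem'
            · exact absurd (Prod.ext hkg hmem') hk
            · obtain ⟨j, hj, hjlt⟩ := (hF k hgk).1 ⟨hkg, hmem'⟩
              exact ⟨j, by rw [hset, hj], by omega⟩
          · intro hn
            rw [hset]
            apply (hF k hgk).2
            rintro ⟨hkg, hmem⟩
            exact hn ⟨hkg, by rw [PySem.Dict.mem_keys_insert]; right; exact hmem⟩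
      have hL' : ∀ k : Int × String, g ≤ k.1 →
          (k.1 = g → (L0.insert (g, pvSel s) s).get? k = (d.insert (pvSel s) s).get? k.2) ∧
          (g < k.1 → (L0.insert (g, pvSel s) s).get? k = none) := by
        intro k hgk
        constructor
        · intro hkg
          by_cases hk : k = (g, pvSel s)
          · subst hk
            rw [PySem.Dict.get?_insert_self, PySem.Dict.get?_insert_self]
          · have hk2 : k.2 ≠ pvSel s := by
              intro h2
              exact hk (Prod.ext hkg h2)
            rw [PySem.Dict.get?_insert_of_ne _ _ hk, PySem.Dict.get?_insert_of_ne _ _ hk2]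
            exact (hL k hgk).1 hkg
        · intro hlt
          have hk : k ≠ (g, pvSel s) := by
            intro h2
            rw [h2] at hlt
            omega
          rw [PySem.Dict.get?_insert_of_ne _ _ hk]
          exact (hL k hgk).2 hlt
      have hIH := ih (i0 + 1) g (F0.setdefault (g, pvSel s) i0) (L0.insert (g, pvSel s) s)
        (d.insert (pvSel s) s) hnd' hF' hL'
      -- the first-table entry for (g, sel s) survives pass 2 over the tail
      have hFfin : ((pvPZ rest (i0 + 1) g).foldl pvB2
            (F0.setdefault (g, pvSel s) i0, L0.insert (g, pvSel s) s)).1.get? (g, pvSel s)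
          = some ((F0.get? (g, pvSel s)).getD i0) :=
        pvP2KeepF _ _ _ _ hF1self
      rw [pvR, if_pos hs, hIH, hfold, hpz, List.flatMap_cons]
      by_cases hmem : pvSel s ∈ d.keys
      · -- selector already pending: B emitted it earlier (first index < i0), emits nothing here
        obtain ⟨j, hj, hjlt⟩ := (hF (g, pvSel s) le_rfl).1 ⟨rfl, hmem⟩
        have hemit : pvEmit ((pvPZ rest (i0 + 1) g).foldl pvB2
              (F0.setdefault (g, pvSel s) i0, L0.insert (g, pvSel s) s)).1
            ((pvPZ rest (i0 + 1) g).foldl pvB2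
              (F0.setdefault (g, pvSel s) i0, L0.insert (g, pvSel s) s)).2 (i0, (g, s)) = [] := by
          have hgd : ((pvPZ rest (i0 + 1) g).foldl pvB2
              (F0.setdefault (g, pvSel s) i0, L0.insert (g, pvSel s) s)).1.getD
                (g, pvSel s) (-1) = j :=
            PySem.Dict.getD_of_get?_eq_some _ _ (by rw [hFfin, hj]; rfl)
          unfold pvEmit
          rw [if_neg (by simp [hs]), hkey, hgd,
            if_neg (by simp only [beq_iff_eq]; intro hc; omega)]
        have hdk : (d.insert (pvSel s) s).keys = d.keys :=
          PySem.Dict.keys_insert_of_contains _ _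
            ((PySem.Dict.contains_iff_mem_keys _ _).2 hmem)
        rw [hemit, hdk]
        simp
      · -- new selector: its first index is i0, so B emits the run-final value right here
        have h0 : F0.get? (g, pvSel s) = none :=
          (hF (g, pvSel s) le_rfl).2 (by simp [hmem])
        have hemit : pvEmit ((pvPZ rest (i0 + 1) g).foldl pvB2
              (F0.setdefault (g, pvSel s) i0, L0.insert (g, pvSel s) s)).1
            ((pvPZ rest (i0 + 1) g).foldl pvB2
              (F0.setdefault (g, pvSel s) i0, L0.insert (g, pvSel s) s)).2 (i0, (g, s))
            = [((pvPZ rest (i0 + 1) g).foldl pvB2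
              (F0.setdefault (g, pvSel s) i0, L0.insert (g, pvSel s) s)).2.getD (g, pvSel s) []] := by
          have hgd : ((pvPZ rest (i0 + 1) g).foldl pvB2
              (F0.setdefault (g, pvSel s) i0, L0.insert (g, pvSel s) s)).1.getD
                (g, pvSel s) (-1) = i0 :=
            PySem.Dict.getD_of_get?_eq_some _ _ (by rw [hFfin, h0]; rfl)
          unfold pvEmit
          rw [if_neg (by simp [hs]), hkey, hgd, if_pos (by simp)]
        have hdk : (d.insert (pvSel s) s).keys = d.keys ++ [pvSel s] :=
          PySem.Dict.keys_insert_of_not_contains _ _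
            (by rw [PySem.Dict.contains_eq_isSome_get?]
                cases hg : d.get? (pvSel s) with
                | none => rfl
                | some v =>
                  exact absurd ((PySem.Dict.contains_iff_mem_keys _ _).1
                    (by rw [PySem.Dict.contains_eq_isSome_get?, hg]; rfl)) hmem)
        rw [hemit, hdk]
        simp
    · -- a non-fill step: A flushes the pending dict, B's tables pass it through
      have hpz : pvPZ (s :: rest) i0 g = (i0, (g, s)) :: pvPZ rest (i0 + 1) (g + 1) := by
        simp [pvPZ, pvGids, hs, List.zip_cons_cons, PySem.List.enumerate_cons]
      have hstep : pvB2 (F0, L0) (i0, (g, s)) = (F0, L0) := by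
        simp [pvB2, hs]
      have hfold : (pvPZ (s :: rest) i0 g).foldl pvB2 (F0, L0)
          = (pvPZ rest (i0 + 1) (g + 1)).foldl pvB2 (F0, L0) := by
        rw [hpz, List.foldl_cons, hstep]
      have hIH := ih (i0 + 1) (g + 1) F0 L0 PySem.Dict.empty
        (by simp [PySem.Dict.keys_empty])
        (by intro k hgk
            constructor
            · intro hmem
              simp [PySem.Dict.keys_empty] at hmem
            · intro _
              exact (hF k (by omega)).2 (by rintro ⟨hkg, _⟩; omega))
        (by intro k hgk
            constructor
            · intro hkg
              rw [PySem.Dict.get?_empty, (hL k (by omega)).2 (by omega)]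
            · intro _
              exact (hL k (by omega)).2 (by omega))
      simp only [PySem.Dict.keys_empty, List.map_nil, List.nil_append] at hIH
      -- no fill in the tail stream carries a gid-g key, so the last table at (g, k) is untouched
      have hLkeep : ∀ k ∈ d.keys,
          ((pvPZ rest (i0 + 1) (g + 1)).foldl pvB2 (F0, L0)).2.get? (g, k) = L0.get? (g, k) := by
        intro k _
        apply pvP2SkipL
        intro q hq _
        have := pvPZGid rest (i0 + 1) (g + 1) q hq
        intro hk
        have : (pvKey q).1 = g := by rw [hk]
        simp only [pvKey] at this
        omega
      have hflush : d.values = d.keys.map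
          (fun k => ((pvPZ (s :: rest) i0 g).foldl pvB2 (F0, L0)).2.getD (g, k) []) := by
        rw [PySem.Dict.values_eq_map_keys d hnd []]
        apply List.map_congr_left
        intro k hk
        rw [hfold, PySem.Dict.getD_eq_get?_getD, PySem.Dict.getD_eq_get?_getD,
          hLkeep k hk, (hL (g, k) le_rfl).1 rfl]
      have hemit : pvEmit ((pvPZ rest (i0 + 1) (g + 1)).foldl pvB2 (F0, L0)).1
          ((pvPZ rest (i0 + 1) (g + 1)).foldl pvB2 (F0, L0)).2 (i0, (g, s)) = [s] := by
        unfold pvEmit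
        rw [if_pos (by simp [hs])]
      rw [pvR, if_neg (by simp [hs]), hflush, hIH, hfold, hpz, List.flatMap_cons, hemit]
      simp

-- ===== VERDICT (by name: the statement is the Claim_ definition above) =====
theorem collapse_fills_py_spec : Claim_equal_collapse_fills_py := by
  intro steps _ _
  unfold Spec_collapse_fills_py collapse_fills_py collapse_fills_py_alt
  rw [pvGidsFold, pvP3Flat]
  have h := pvMain steps 0 0 PySem.Dict.empty PySem.Dict.empty PySem.Dict.empty
    (by simp [PySem.Dict.keys_empty])
    (by intro k _; simp [PySem.Dict.get?_empty, PySem.Dict.keys_empty])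
    (by intro k _; simp [PySem.Dict.get?_empty])
  rw [pvFoldA steps [] PySem.Dict.empty]
  simp only [List.nil_append] at h ⊢
  rw [h]
  simp [pvPZ, PySem.Dict.keys_empty]
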